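-- pv_equiv track=rewrite | github.com/linhdvu14/cp-sols | sols/CodeForces/1809_edu/C_Sum_on_Subarrays.py | solve
-- ===== SOURCE A (Python) =====
-- def solve(N, K):
--     pos = [0] * N
--     for i in range(N - 1, -1, -1):
--         if i + 1 <= K:
--             pos[i] = 1
--             K -= i + 1
--
--     mn = mx = s = 0
--     res = [0] * N
--     for i, p in enumerate(pos):
--         if p: res[i] = mx + 1 - s
--         else: res[i] = mn - 1 - s
--         s += res[i]
--         mn = min(mn, s)
--         mx = max(mx, s)
--
--     return res
-- ===== SOURCE B (Python) =====
-- def solve(N, K):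
--     # closed-form greedy: count how many top subarray-lengths N, N-1, ... fit into K
--     rem = K
--     t = 0
--     while t < N and N - t <= rem:
--         rem -= N - t
--         t += 1
--     m = N - t
--     if t < N and rem > 0:
--         head = [-1] * (rem - 1) + [rem, -(rem + 1)] + [-1] * (m - 1 - rem)
--     else:
--         head = [-1] * m
--     tail = [m + 1] + [1] * (t - 1) if t > 0 else []
--     return head + tail
-- ===== Notes on version B (the rewrite author's own statement) =====
-- stated objective: faster
-- what changed: B drops both of A's per-element passes (greedy marking of a pos array, then emission with running min/max/sum bookkeeping): a short counting loop finds how many top lengths t and which remainder r the greedy takes, and the answer is assembled in closed form from constant segments ((-1)-runs, r, -(r+1), m+1, 1-runs).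
import Mathlib
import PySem

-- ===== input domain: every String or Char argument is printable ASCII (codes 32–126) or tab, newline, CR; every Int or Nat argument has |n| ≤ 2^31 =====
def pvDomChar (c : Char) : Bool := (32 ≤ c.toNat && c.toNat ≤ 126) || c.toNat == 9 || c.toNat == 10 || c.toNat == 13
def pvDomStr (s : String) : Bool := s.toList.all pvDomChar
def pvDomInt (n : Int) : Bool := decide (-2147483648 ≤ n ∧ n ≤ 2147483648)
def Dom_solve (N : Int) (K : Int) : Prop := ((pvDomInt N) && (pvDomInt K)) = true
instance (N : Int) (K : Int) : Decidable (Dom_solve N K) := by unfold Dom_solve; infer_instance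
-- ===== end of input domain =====

-- B replaces A's two per-element passes (greedy pos marking, then emission with running
-- min/max/sum) by a closed-form construction: a counting loop finds the number t of top
-- lengths and the remainder r the greedy takes, and the result is assembled from segments.

-- ===== PORT A =====
-- first loop: for i in range(N-1,-1,-1): if i+1<=K: pos[i]=1; K-=i+1
def solveLoopPos : List Int → List Int → Int → List Int × Int
  | [], pos, K => (pos, K)
  | i :: rest, pos, K =>
    if i + 1 ≤ K then solveLoopPos rest (pos.set i.toNat 1) (K - (i + 1))
    else solveLoopPos rest pos K

-- second loop: for i,p in enumerate(pos): res[i] = …; s += res[i]; mn/mx updated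
def solveLoopRes : List Int → Int → Int → Int → Int → List Int → List Int
  | [], _, _, _, _, res => res
  | p :: rest, i, mn, mx, s, res =>
    let v := if p ≠ 0 then mx + 1 - s else mn - 1 - s
    let res' := res.set i.toNat v
    let s' := s + v
    solveLoopRes rest (i + 1) (min mn s') (max mx s') s' res'

def solve (N : Int) (K : Int) : List Int :=
  solveLoopRes (solveLoopPos (PySem.List.pyRange (N - 1) (-1) (-1)) (List.replicate N.toNat 0) K).1
    0 0 0 0 (List.replicate N.toNat 0)

-- ===== PORT B =====
-- while t < N and N - t <= rem: rem -= N - t; t += 1   (fuel N.toNat bounds the ≤ N.toNat iterations)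
def altLoop : Nat → Int → Int → Int → Int × Int
  | 0, _, t, rem => (t, rem)
  | fuel + 1, N, t, rem =>
    if t < N ∧ N - t ≤ rem then altLoop fuel N (t + 1) (rem - (N - t)) else (t, rem)

def solve_alt (N : Int) (K : Int) : List Int :=
  let p := altLoop N.toNat N 0 K
  let m := N - p.1
  (if p.1 < N ∧ 0 < p.2 then
      List.replicate (p.2 - 1).toNat (-1) ++ [p.2, -(p.2 + 1)] ++ List.replicate (m - 1 - p.2).toNat (-1)
    else List.replicate m.toNat (-1)) ++
  (if 0 < p.1 then (m + 1) :: List.replicate (p.1 - 1).toNat 1 else [])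

-- ===== PRECONDITION & SPEC =====
def Spec_solve (N : Int) (K : Int) (out : List Int) : Prop := out = solve_alt N K
instance (N : Int) (K : Int) (out : List Int) : Decidable (Spec_solve N K out) := by unfold Spec_solve; infer_instance

-- ===== CLAIM (what is proved, stated in full; the proofs are below) =====
def Claim_equal_solve : Prop := ∀ (N : Int) (K : Int), Dom_solve N K → Spec_solve N K (solve N K)

-- ===== LEMMAS AND PROOFS =====

-- proof-only helpers: the greedy over values n, n-1, …, 1 expressed structurally
def greedyTop : Nat → Int → Int × Int
  | 0, K => (0, K)
  | n + 1, K =>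
    if (n : Int) + 1 ≤ K then
      ((greedyTop n (K - ((n : Int) + 1))).1 + 1, (greedyTop n (K - ((n : Int) + 1))).2)
    else (0, K)

def pickList : Nat → Int → List Int
  | 0, _ => []
  | n + 1, K =>
    if (n : Int) + 1 ≤ K then pickList n (K - ((n : Int) + 1)) ++ [1] else pickList n K ++ [0]

theorem greedyTop_nonneg (n : Nat) : ∀ K, 0 ≤ (greedyTop n K).1 := by
  induction n with
  | zero => intro K; simp [greedyTop]
  | succ n ih =>
    intro K
    simp only [greedyTop]
    split_ifs with h
    · dsimp only
      have := ih (K - ((n : Int) + 1)); omega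
    · simp

theorem greedyTop_le (n : Nat) : ∀ K, (greedyTop n K).1 ≤ n := by
  induction n with
  | zero => intro K; simp [greedyTop]
  | succ n ih =>
    intro K
    simp only [greedyTop]
    split_ifs with h
    · dsimp only
      have := ih (K - ((n : Int) + 1)); push_cast; omega
    · dsimp only; push_cast; omega

theorem greedyTop_max (n : Nat) : ∀ K, (greedyTop n K).1 < n → (greedyTop n K).2 < n - (greedyTop n K).1 := by
  induction n with
  | zero => intro K h; simp [greedyTop] at h
  | succ n ih =>
    intro K
    simp only [greedyTop]
    split_ifs with h
    · dsimp only
      intro hlt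
      have := ih (K - ((n : Int) + 1)) (by push_cast at hlt ⊢; omega)
      push_cast at hlt ⊢; omega
    · dsimp only; intro _; push_cast; omega

theorem altLoop_eq_greedyTop (n : Nat) : ∀ (t rem : Int),
    altLoop n (t + n) t rem = ((greedyTop n rem).1 + t, (greedyTop n rem).2) := by
  induction n with
  | zero => intro t rem; simp [altLoop, greedyTop]
  | succ n ih =>
    intro t rem
    have hc : t < t + ((n : Nat) + 1 : Nat) := by push_cast; omega
    have hd : (t + ((n : Nat) + 1 : Nat)) - t = (n : Int) + 1 := by push_cast; ring
    simp only [altLoop, hd]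
    split_ifs with h
    · have h2 : t + ((n : Nat) + 1 : Nat) = (t + 1) + (n : Nat) := by push_cast; ring
      have hg : greedyTop (n + 1) rem
          = ((greedyTop n (rem - ((n : Int) + 1))).1 + 1, (greedyTop n (rem - ((n : Int) + 1))).2) := by
        simp only [greedyTop]
        rw [if_pos h.2]
      rw [h2, ih (t + 1) (rem - ((n : Int) + 1)), hg, Prod.mk.injEq]
      exact ⟨by ring, rfl⟩
    · push_cast at h hc
      rcases not_and_or.mp h with h' | h'
      · omega
      · simp only [greedyTop, if_neg (by omega : ¬ ((n : Int) + 1 ≤ rem))]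
        simp
  
-- in-place set at the border of a zero block
theorem set_rep (n : Nat) (done : List Int) :
    (List.replicate (n + 1) (0 : Int) ++ done).set n 1 = List.replicate n 0 ++ 1 :: done := by
  induction n with
  | zero => rfl
  | succ n ih =>
    rw [show List.replicate (n + 1 + 1) (0 : Int) ++ done = 0 :: (List.replicate (n + 1) 0 ++ done) from by
      simp [List.replicate_succ]]
    rw [show (0 :: (List.replicate (n + 1) 0 ++ done)).set (n + 1) 1
        = 0 :: ((List.replicate (n + 1) 0 ++ done).set n 1) from rfl]
    rw [ih]
    simp [List.replicate_succ]

-- A's first loop over range(N-1,-1,-1) computes pickList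
theorem posLoop_eq (n : Nat) : ∀ (K : Int) (done : List Int), ∃ K',
    solveLoopPos (PySem.List.pyRange ((n : Int) - 1) (-1) (-1)) (List.replicate n 0 ++ done) K
      = (pickList n K ++ done, K') := by
  induction n with
  | zero =>
    intro K done
    rw [PySem.List.pyRange_neg_one_eq_nil (by omega)]
    exact ⟨K, by simp [solveLoopPos, pickList]⟩
  | succ n ih =>
    intro K done
    have h1 : ((n + 1 : Nat) : Int) - 1 = (n : Int) := by push_cast; ring
    rw [h1, PySem.List.pyRange_neg_one_cons (by omega)]
    simp only [solveLoopPos, pickList]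
    split_ifs with h
    · have hset : (List.replicate (n + 1) (0 : Int) ++ done).set ((n : Int)).toNat 1
          = List.replicate n 0 ++ 1 :: done := by
        rw [Int.toNat_natCast]; exact set_rep n done
      rw [hset]
      obtain ⟨K', hK'⟩ := ih (K - ((n : Int) + 1)) (1 :: done)
      exact ⟨K', by rw [hK']; simp⟩
    · obtain ⟨K', hK'⟩ := ih K (0 :: done)
      refine ⟨K', ?_⟩
      have : List.replicate (n + 1) (0 : Int) ++ done = List.replicate n 0 ++ 0 :: done := by
        simp [List.replicate_succ']
      rw [this, hK']; simp

-- low phase: all remaining values exceed nothing; the greedy picks exactly the value K (if ≥ 1)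
theorem pickList_low (n : Nat) : ∀ (K : Int), K ≤ n →
    pickList n K = if 1 ≤ K then List.replicate (K.toNat - 1) 0 ++ 1 :: List.replicate (n - K.toNat) 0
                   else List.replicate n 0 := by
  induction n with
  | zero => intro K hK; rw [if_neg (by omega)]; rfl
  | succ n ih =>
    intro K hK
    push_cast at hK
    by_cases h : (n : Int) + 1 ≤ K
    · have h1 : (1 : Int) ≤ K := by omega
      simp only [pickList, if_pos h]
      rw [show K - ((n : Int) + 1) = 0 from by omega]
      rw [ih 0 (by omega), if_neg (by omega), if_pos h1]
      have h3 : K.toNat - 1 = n := by omega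
      have h4 : n + 1 - K.toNat = 0 := by omega
      simp [h3, h4]
    · simp only [pickList, if_neg h]
      rw [ih K (by omega)]
      by_cases h1 : (1 : Int) ≤ K
      · rw [if_pos h1, if_pos h1]
        have h2 : n + 1 - K.toNat = (n - K.toNat) + 1 := by omega
        simp [h2, List.replicate_succ']
      · rw [if_neg h1, if_neg h1]
        simp [List.replicate_succ']

-- structure of the pos array: zeros, one mark at the remainder, zeros, t top marks
theorem pickList_eq (n : Nat) : ∀ (K : Int),
    pickList n K =
      if (greedyTop n K).1 < (n : Int) ∧ 1 ≤ (greedyTop n K).2 then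
        List.replicate ((greedyTop n K).2.toNat - 1) 0 ++ 1 ::
          (List.replicate (n - (greedyTop n K).1.toNat - (greedyTop n K).2.toNat) 0 ++
           List.replicate (greedyTop n K).1.toNat 1)
      else
        List.replicate (n - (greedyTop n K).1.toNat) 0 ++ List.replicate (greedyTop n K).1.toNat 1 := by
  induction n with
  | zero => intro K; rw [if_neg (by simp [greedyTop])]; rfl
  | succ n ih =>
    intro K
    by_cases h : (n : Int) + 1 ≤ K
    · have ht0 := greedyTop_nonneg n (K - ((n : Int) + 1))
      have htle := greedyTop_le n (K - ((n : Int) + 1))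
      simp only [pickList, greedyTop, if_pos h]
      rw [ih (K - ((n : Int) + 1))]
      have htoNat : ((greedyTop n (K - ((n : Int) + 1))).1 + 1).toNat
          = (greedyTop n (K - ((n : Int) + 1))).1.toNat + 1 := by omega
      have hcond : ((greedyTop n (K - ((n : Int) + 1))).1 < (n : Int) ∧ 1 ≤ (greedyTop n (K - ((n : Int) + 1))).2)
          ↔ ((greedyTop n (K - ((n : Int) + 1))).1 + 1 < ((n + 1 : Nat) : Int) ∧ 1 ≤ (greedyTop n (K - ((n : Int) + 1))).2) := by
        push_cast; omega
      split_ifs with hc hc2 hc2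
      · rw [htoNat]
        have hl : n - (greedyTop n (K - ((n : Int) + 1))).1.toNat - (greedyTop n (K - ((n : Int) + 1))).2.toNat
            = n + 1 - ((greedyTop n (K - ((n : Int) + 1))).1.toNat + 1) - (greedyTop n (K - ((n : Int) + 1))).2.toNat := by
          omega
        rw [hl, List.replicate_succ' (n := (greedyTop n (K - ((n : Int) + 1))).1.toNat)]
        simp [List.append_assoc]
      · exact absurd (hcond.mp hc) hc2
      · exact absurd (hcond.mpr hc2) hc
      · rw [htoNat]
        have hl : n - (greedyTop n (K - ((n : Int) + 1))).1.toNat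
            = n + 1 - ((greedyTop n (K - ((n : Int) + 1))).1.toNat + 1) := by omega
        rw [hl, List.replicate_succ' (n := (greedyTop n (K - ((n : Int) + 1))).1.toNat)]
        simp [List.append_assoc]
    · have hg : greedyTop (n + 1) K = (0, K) := by
        simp only [greedyTop]; rw [if_neg h]
      rw [hg, pickList_low (n + 1) K (by push_cast; omega)]
      have hpos : (0 : Int) < ((n + 1 : Nat) : Int) := by push_cast; omega
      split_ifs with h1 h2 h2
      · simp
      · exact absurd ⟨hpos, h1⟩ h2
      · exact absurd h2.2 h1
      · simp

-- ===== res-phase lemmas: how A's second loop walks over the segment structure =====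

-- a run of zeros starting from s = mn emits (-1)s and lowers mn
theorem zrun (a : Nat) : ∀ (rest : List Int) (mn mx : Int) (done : List Int), mn ≤ mx →
    solveLoopRes (List.replicate a 0 ++ rest) (done.length) mn mx mn
        (done ++ List.replicate (a + rest.length) 0)
      = solveLoopRes rest ((done ++ List.replicate a (-1)).length) (mn - a) mx (mn - a)
          ((done ++ List.replicate a (-1)) ++ List.replicate rest.length 0) := by
  induction a with
  | zero => intro rest mn mx done _; simp
  | succ a ih =>
    intro rest mn mx done h
    have hrep : List.replicate (a + 1 + rest.length) (0 : Int)
        = 0 :: List.replicate (a + rest.length) 0 := by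
      rw [← List.replicate_succ]; congr 1; omega
    simp only [List.replicate_succ, List.cons_append, solveLoopRes, hrep]
    rw [if_neg (by simp)]
    have hset : (done ++ 0 :: List.replicate (a + rest.length) (0 : Int)).set
        ((done.length : Int)).toNat (mn - 1 - mn) = (done ++ [-1]) ++ List.replicate (a + rest.length) 0 := by
      have : mn - 1 - mn = -1 := by ring
      simp [this, List.append_assoc]
    rw [hset]
    have hmn : min mn (mn + (mn - 1 - mn)) = mn - 1 := by omega
    have hmx : max mx (mn + (mn - 1 - mn)) = mx := by omega
    have hs : mn + (mn - 1 - mn) = mn - 1 := by ring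
    have hi : (done.length : Int) + 1 = ((done ++ [(-1 : Int)]).length : Int) := by simp
    rw [hmn, hmx, hs, hi, ih rest (mn - 1) mx (done ++ [-1]) (by omega)]
    have h1 : mn - 1 - a = mn - ((a : Int) + 1) := by ring
    have h2 : (done ++ [(-1 : Int)]) ++ List.replicate a (-1) = done ++ List.replicate (a + 1) (-1) := by
      simp [List.replicate_succ]
    rw [h2] at *
    congr 1

-- a run of ones starting from s = mx emits 1s and raises mx
theorem orun (a : Nat) : ∀ (rest : List Int) (mn mx : Int) (done : List Int), mn ≤ mx →
    solveLoopRes (List.replicate a 1 ++ rest) (done.length) mn mx mx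
        (done ++ List.replicate (a + rest.length) 0)
      = solveLoopRes rest ((done ++ List.replicate a 1).length) mn (mx + a) (mx + a)
          ((done ++ List.replicate a 1) ++ List.replicate rest.length 0) := by
  induction a with
  | zero => intro rest mn mx done _; simp
  | succ a ih =>
    intro rest mn mx done h
    have hrep : List.replicate (a + 1 + rest.length) (0 : Int)
        = 0 :: List.replicate (a + rest.length) 0 := by
      rw [← List.replicate_succ]; congr 1; omega
    simp only [List.replicate_succ, List.cons_append, solveLoopRes, hrep]
    rw [if_pos (by norm_num)]
    have hset : (done ++ 0 :: List.replicate (a + rest.length) (0 : Int)).set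
        ((done.length : Int)).toNat (mx + 1 - mx) = (done ++ [1]) ++ List.replicate (a + rest.length) 0 := by
      have : mx + 1 - mx = 1 := by ring
      simp [this, List.append_assoc]
    rw [hset]
    have hmn : min mn (mx + (mx + 1 - mx)) = mn := by omega
    have hmx : max mx (mx + (mx + 1 - mx)) = mx + 1 := by omega
    have hs : mx + (mx + 1 - mx) = mx + 1 := by ring
    have hi : (done.length : Int) + 1 = ((done ++ [(1 : Int)]).length : Int) := by simp
    rw [hmn, hmx, hs, hi, ih rest mn (mx + 1) (done ++ [1]) (by omega)]
    have h2 : (done ++ [(1 : Int)]) ++ List.replicate a 1 = done ++ List.replicate (a + 1) 1 := by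
      simp [List.replicate_succ]
    rw [h2] at *
    congr 1 <;> push_cast <;> omega

-- entering a zero from an arbitrary s
theorem zfirst (rest : List Int) (mn mx s : Int) (done : List Int) (h : mn - 1 ≤ mx) :
    solveLoopRes (0 :: rest) (done.length) mn mx s (done ++ List.replicate (rest.length + 1) 0)
      = solveLoopRes rest ((done ++ [mn - 1 - s]).length) (mn - 1) mx (mn - 1)
          ((done ++ [mn - 1 - s]) ++ List.replicate rest.length 0) := by
  have hrep : List.replicate (rest.length + 1) (0 : Int) = 0 :: List.replicate rest.length 0 := by
    rw [← List.replicate_succ]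
  simp only [solveLoopRes, hrep]
  rw [if_neg (by simp)]
  have hset : (done ++ 0 :: List.replicate rest.length (0 : Int)).set
      ((done.length : Int)).toNat (mn - 1 - s) = (done ++ [mn - 1 - s]) ++ List.replicate rest.length 0 := by
    simp [List.append_assoc]
  rw [hset]
  have hmn : min mn (s + (mn - 1 - s)) = mn - 1 := by omega
  have hmx : max mx (s + (mn - 1 - s)) = mx := by omega
  have hs : s + (mn - 1 - s) = mn - 1 := by ring
  have hi : (done.length : Int) + 1 = ((done ++ [mn - 1 - s]).length : Int) := by simp
  rw [hmn, hmx, hs, hi]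

-- entering a one from an arbitrary s
theorem ofirst (rest : List Int) (mn mx s : Int) (done : List Int) (h : mn ≤ mx + 1) :
    solveLoopRes (1 :: rest) (done.length) mn mx s (done ++ List.replicate (rest.length + 1) 0)
      = solveLoopRes rest ((done ++ [mx + 1 - s]).length) mn (mx + 1) (mx + 1)
          ((done ++ [mx + 1 - s]) ++ List.replicate rest.length 0) := by
  have hrep : List.replicate (rest.length + 1) (0 : Int) = 0 :: List.replicate rest.length 0 := by
    rw [← List.replicate_succ]
  simp only [solveLoopRes, hrep]
  rw [if_pos (by norm_num)]
  have hset : (done ++ 0 :: List.replicate rest.length (0 : Int)).set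
      ((done.length : Int)).toNat (mx + 1 - s) = (done ++ [mx + 1 - s]) ++ List.replicate rest.length 0 := by
    simp [List.append_assoc]
  rw [hset]
  have hmn : min mn (s + (mx + 1 - s)) = mn := by omega
  have hmx : max mx (s + (mx + 1 - s)) = mx + 1 := by omega
  have hs : s + (mx + 1 - s) = mx + 1 := by ring
  have hi : (done.length : Int) + 1 = ((done ++ [mx + 1 - s]).length : Int) := by simp
  rw [hmn, hmx, hs, hi]

-- the second loop over the segment-structured pos array produces B's segments
theorem res_eq (n : Nat) (K : Int) :
    solveLoopRes (pickList n K) 0 0 0 0 (List.replicate n 0)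
      = (if (greedyTop n K).1 < (n : Int) ∧ 0 < (greedyTop n K).2 then
            List.replicate ((greedyTop n K).2 - 1).toNat (-1) ++
              [(greedyTop n K).2, -((greedyTop n K).2 + 1)] ++
              List.replicate ((n : Int) - (greedyTop n K).1 - 1 - (greedyTop n K).2).toNat (-1)
          else List.replicate ((n : Int) - (greedyTop n K).1).toNat (-1)) ++
        (if 0 < (greedyTop n K).1 then
            ((n : Int) - (greedyTop n K).1 + 1) :: List.replicate ((greedyTop n K).1 - 1).toNat 1
          else []) := by
  have ht0 := greedyTop_nonneg n K
  have htle := greedyTop_le n K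
  have htmax := greedyTop_max n K
  rw [pickList_eq n K]
  by_cases hc : (greedyTop n K).1 < (n : Int) ∧ 1 ≤ (greedyTop n K).2
  · rw [if_pos hc, if_pos (show (greedyTop n K).1 < (n : Int) ∧ 0 < (greedyTop n K).2 from ⟨hc.1, by omega⟩)]
    have hmaxlt := htmax hc.1
    have hrem1 : 1 ≤ (greedyTop n K).2 := hc.2
    have htltn : (greedyTop n K).1 < (n : Int) := hc.1
    set t := (greedyTop n K).1 with htdef
    set rem := (greedyTop n K).2 with hremdef
    set tn := t.toNat with htndef
    set a0 := rem.toNat - 1 with ha0def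
    set b := n - tn - rem.toNat with hbdef
    have hb1 : 1 ≤ b := by omega
    have step1 := zrun a0 (1 :: (List.replicate b 0 ++ List.replicate tn 1)) 0 0 [] le_rfl
    simp only [List.length_nil, Nat.cast_zero, List.nil_append] at step1
    rw [show List.replicate n (0 : Int)
        = List.replicate (a0 + ((1 : Int) :: (List.replicate b 0 ++ List.replicate tn 1)).length) 0 from by
      congr 1; simp; omega]
    rw [step1]
    rw [show ((1 : Int) :: (List.replicate b (0 : Int) ++ List.replicate tn 1)).length
        = (List.replicate b (0 : Int) ++ List.replicate tn 1).length + 1 from by simp]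
    rw [ofirst (List.replicate b 0 ++ List.replicate tn 1) (0 - (a0 : Int)) 0 (0 - (a0 : Int))
        (List.replicate a0 (-1)) (by omega)]
    rw [show List.replicate b (0 : Int) = 0 :: List.replicate (b - 1) 0 from by
      rw [show b = (b - 1) + 1 from by omega]; simp [List.replicate_succ]]
    simp only [List.cons_append]
    rw [show ((0 : Int) :: (List.replicate (b - 1) (0 : Int) ++ List.replicate tn 1)).length
        = (List.replicate (b - 1) (0 : Int) ++ List.replicate tn 1).length + 1 from by simp]
    rw [zfirst (List.replicate (b - 1) 0 ++ List.replicate tn 1) (0 - (a0 : Int)) (0 + 1) (0 + 1)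
        (List.replicate a0 (-1) ++ [0 + 1 - (0 - (a0 : Int))]) (by omega)]
    rw [show (List.replicate (b - 1) (0 : Int) ++ List.replicate tn (1 : Int)).length
        = (b - 1) + (List.replicate tn (1 : Int)).length from by simp]
    rw [zrun (b - 1) (List.replicate tn 1) (0 - (a0 : Int) - 1) (0 + 1)
        ((List.replicate a0 (-1) ++ [0 + 1 - (0 - (a0 : Int))]) ++ [0 - (a0 : Int) - 1 - (0 + 1)])
        (by omega)]
    by_cases htn0 : tn = 0
    · rw [htn0]
      simp only [List.replicate_zero, solveLoopRes]
      rw [if_neg (by omega : ¬ (0 : Int) < t)]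
      rw [show (0 : Int) + 1 - (0 - (a0 : Int)) = rem from by omega,
          show (0 : Int) - (a0 : Int) - 1 - (0 + 1) = -(rem + 1) from by omega,
          show (rem - 1).toNat = a0 from by omega,
          show ((n : Int) - t - 1 - rem).toNat = b - 1 from by omega]
      simp [List.append_assoc]
    · rw [show List.replicate tn (1 : Int) = 1 :: List.replicate (tn - 1) 1 from by
        rw [show tn = (tn - 1) + 1 from by omega]; simp [List.replicate_succ]]
      rw [show ((1 : Int) :: List.replicate (tn - 1) (1 : Int)).length
          = (List.replicate (tn - 1) (1 : Int)).length + 1 from by simp]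
      rw [ofirst (List.replicate (tn - 1) 1) (0 - (a0 : Int) - 1 - ((b - 1 : Nat) : Int)) (0 + 1)
          (0 - (a0 : Int) - 1 - ((b - 1 : Nat) : Int))
          ((((List.replicate a0 (-1) ++ [0 + 1 - (0 - (a0 : Int))]) ++ [0 - (a0 : Int) - 1 - (0 + 1)]))
            ++ List.replicate (b - 1) (-1)) (by omega)]
      rw [show List.replicate (tn - 1) (1 : Int) = List.replicate (tn - 1) 1 ++ [] from by simp]
      rw [show ((List.replicate (tn - 1) (1 : Int) ++ ([] : List Int)).length)
          = (tn - 1) + ([] : List Int).length from by simp]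
      rw [orun (tn - 1) [] (0 - (a0 : Int) - 1 - ((b - 1 : Nat) : Int)) (0 + 1 + 1)
          (((((List.replicate a0 (-1) ++ [0 + 1 - (0 - (a0 : Int))]) ++ [0 - (a0 : Int) - 1 - (0 + 1)]))
            ++ List.replicate (b - 1) (-1)) ++ [0 + 1 + 1 - (0 - (a0 : Int) - 1 - ((b - 1 : Nat) : Int))])
          (by omega)]
      simp only [solveLoopRes]
      rw [if_pos (by omega : (0 : Int) < t)]
      rw [show (0 : Int) + 1 - (0 - (a0 : Int)) = rem from by omega,
          show (0 : Int) - (a0 : Int) - 1 - (0 + 1) = -(rem + 1) from by omega,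
          show (0 : Int) + 1 + 1 - (0 - (a0 : Int) - 1 - ((b - 1 : Nat) : Int)) = (n : Int) - t + 1 from by omega,
          show (rem - 1).toNat = a0 from by omega,
          show ((n : Int) - t - 1 - rem).toNat = b - 1 from by omega,
          show (t - 1).toNat = tn - 1 from by omega]
      simp [List.append_assoc]
  · rw [if_neg hc, if_neg (show ¬ ((greedyTop n K).1 < (n : Int) ∧ 0 < (greedyTop n K).2) from by omega)]
    set t := (greedyTop n K).1 with htdef
    set rem := (greedyTop n K).2 with hremdef
    set tn := t.toNat with htndef
    have step1 := zrun (n - tn) (List.replicate tn 1) 0 0 [] le_rfl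
    simp only [List.length_nil, Nat.cast_zero, List.nil_append] at step1
    rw [show List.replicate n (0 : Int)
        = List.replicate ((n - tn) + (List.replicate tn (1 : Int)).length) 0 from by
      congr 1; simp; omega]
    rw [step1]
    by_cases htn0 : tn = 0
    · rw [htn0]
      simp only [List.replicate_zero, solveLoopRes]
      rw [if_neg (by omega : ¬ (0 : Int) < t)]
      rw [show ((n : Int) - t).toNat = n - 0 from by omega]
      simp
    · rw [show List.replicate tn (1 : Int) = 1 :: List.replicate (tn - 1) 1 from by
        rw [show tn = (tn - 1) + 1 from by omega]; simp [List.replicate_succ]]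
      rw [show ((1 : Int) :: List.replicate (tn - 1) (1 : Int)).length
          = (List.replicate (tn - 1) (1 : Int)).length + 1 from by simp]
      rw [ofirst (List.replicate (tn - 1) 1) (0 - ((n - tn : Nat) : Int)) 0 (0 - ((n - tn : Nat) : Int))
          (List.replicate (n - tn) (-1)) (by omega)]
      rw [show List.replicate (tn - 1) (1 : Int) = List.replicate (tn - 1) 1 ++ [] from by simp]
      rw [show ((List.replicate (tn - 1) (1 : Int) ++ ([] : List Int)).length)
          = (tn - 1) + ([] : List Int).length from by simp]
      rw [orun (tn - 1) [] (0 - ((n - tn : Nat) : Int)) (0 + 1)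
          (List.replicate (n - tn) (-1) ++ [0 + 1 - (0 - ((n - tn : Nat) : Int))]) (by omega)]
      simp only [solveLoopRes]
      rw [if_pos (by omega : (0 : Int) < t)]
      rw [show (0 : Int) + 1 - (0 - ((n - tn : Nat) : Int)) = (n : Int) - t + 1 from by omega,
          show ((n : Int) - t).toNat = n - tn from by omega,
          show (t - 1).toNat = tn - 1 from by omega]
      simp [List.append_assoc]

-- ===== VERDICT (by name: the statement is the Claim_ definition above) =====
theorem solve_spec : Claim_equal_solve := by
  intro N K _
  unfold Spec_solve
  by_cases hN : N < 0
  · have h0 : N.toNat = 0 := by omega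
    unfold solve solve_alt
    rw [h0, PySem.List.pyRange_neg_one_eq_nil (by omega : N - 1 ≤ -1)]
    simp only [altLoop, solveLoopPos, List.replicate, solveLoopRes]
    rw [if_neg (by dsimp only; omega : ¬ (((0 : Int), K).1 < N ∧ 0 < ((0 : Int), K).2)),
        if_neg (by dsimp only; omega : ¬ ((0 : Int) < ((0 : Int), K).1))]
    rw [show (N - 0).toNat = 0 from by omega]
    simp
  · rw [Int.not_lt] at hN
    have hNn : ((N.toNat : Nat) : Int) = N := by omega
    have halt : altLoop N.toNat N 0 K = greedyTop N.toNat K := by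
      have h := altLoop_eq_greedyTop N.toNat 0 K
      rw [zero_add, add_zero] at h
      calc altLoop N.toNat N 0 K = altLoop N.toNat ((N.toNat : Int)) 0 K := by rw [hNn]
        _ = ((greedyTop N.toNat K).1, (greedyTop N.toNat K).2) := h
        _ = greedyTop N.toNat K := rfl
    obtain ⟨K', hpos⟩ := posLoop_eq N.toNat K []
    unfold solve solve_alt
    rw [show N - 1 = ((N.toNat : Nat) : Int) - 1 from by omega]
    rw [show solveLoopPos (PySem.List.pyRange (((N.toNat : Nat) : Int) - 1) (-1) (-1)) (List.replicate N.toNat 0) K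
        = (pickList N.toNat K ++ [], K') from by rw [← hpos]; simp]
    rw [show pickList N.toNat K ++ [] = pickList N.toNat K from by simp]
    rw [halt, res_eq N.toNat K, hNn]
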